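-- pv_equiv track=rewrite | github.com/pedroivoal/Dessoft | Exercicios/08.Dicionário/41.Classifica faixas etárias.py | agrupa_por_idade
-- ===== SOURCE A (Python) =====
-- def agrupa_por_idade(grupo):
--
--     faixas = {
--         'criança': [],
--         'adolescente': [],
--         'adulto': [],
--         'idoso': []
--     }
--
--
--     for nome, idade in grupo.items():
--
--         if idade <= 11:
--             faixas['criança'].append(nome)
--         elif idade <= 17:
--             faixas['adolescente'].append(nome)
--         elif idade <= 59:
--             faixas['adulto'].append(nome)
--         else:
--             faixas['idoso'].append(nome)
--
--     return faixas
-- ===== SOURCE B (Python) =====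
-- def agrupa_por_idade(grupo):
--     def nomes(cond):
--         return [nome for nome, idade in grupo.items() if cond(idade)]
--     return {
--         'criança': nomes(lambda i: i <= 11),
--         'adolescente': nomes(lambda i: 11 < i <= 17),
--         'adulto': nomes(lambda i: 17 < i <= 59),
--         'idoso': nomes(lambda i: 59 < i),
--     }
-- ===== Notes on version B (the rewrite author's own statement) =====
-- stated objective: alternative
-- what changed: Replaces the single mutating pass with an if/elif ladder by four independent filter passes (one list comprehension per age bracket) assembled directly into the result dict, with no mutation or branching state.
import Mathlib
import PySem

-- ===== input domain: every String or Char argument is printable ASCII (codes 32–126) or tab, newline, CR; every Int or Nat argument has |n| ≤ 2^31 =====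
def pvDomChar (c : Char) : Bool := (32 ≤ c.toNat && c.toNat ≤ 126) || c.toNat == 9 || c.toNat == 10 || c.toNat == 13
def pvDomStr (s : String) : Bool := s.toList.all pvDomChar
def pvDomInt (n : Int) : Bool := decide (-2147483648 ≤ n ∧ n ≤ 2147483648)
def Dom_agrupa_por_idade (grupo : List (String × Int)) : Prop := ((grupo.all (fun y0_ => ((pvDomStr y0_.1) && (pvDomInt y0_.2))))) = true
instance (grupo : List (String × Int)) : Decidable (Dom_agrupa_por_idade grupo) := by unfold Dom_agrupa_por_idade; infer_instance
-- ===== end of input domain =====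

-- B replaces A's single mutating pass (if/elif ladder appending into a dict) by four
-- independent filter passes, one list comprehension per age bracket (alternative decomposition).


-- ===== PORT A =====
def agrupa_por_idade (grupo : List (String × Int)) : List (String × List String) :=
  let faixas : PySem.Dict String (List String) :=
    PySem.Dict.ofList [("criança", []), ("adolescente", []), ("adulto", []), ("idoso", [])]
  let faixas := grupo.foldl (fun d p =>
    if p.2 ≤ 11 then d.modify "criança" [] (· ++ [p.1])
    else if p.2 ≤ 17 then d.modify "adolescente" [] (· ++ [p.1])
    else if p.2 ≤ 59 then d.modify "adulto" [] (· ++ [p.1])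
    else d.modify "idoso" [] (· ++ [p.1])) faixas
  faixas.items

-- ===== PORT B =====
-- the inner helper 'nomes(cond)': one filtering comprehension over grupo
def pvNomes (grupo : List (String × Int)) (cond : Int → Bool) : List String :=
  (grupo.filter (fun p => cond p.2)).map Prod.fst

def agrupa_por_idade_alt (grupo : List (String × Int)) : List (String × List String) :=
  (PySem.Dict.ofList
    [("criança", pvNomes grupo (fun i => i ≤ 11)),
     ("adolescente", pvNomes grupo (fun i => 11 < i && i ≤ 17)),
     ("adulto", pvNomes grupo (fun i => 17 < i && i ≤ 59)),
     ("idoso", pvNomes grupo (fun i => 59 < i))]).items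

-- ===== PRECONDITION & SPEC =====
def Spec_agrupa_por_idade (grupo : List (String × Int)) (out : List (String × List String)) : Prop := out = agrupa_por_idade_alt grupo
instance (grupo : List (String × Int)) (out : List (String × List String)) : Decidable (Spec_agrupa_por_idade grupo out) := by unfold Spec_agrupa_por_idade; infer_instance

-- ===== CLAIM (what is proved, stated in full; the proofs are below) =====
def Claim_equal_agrupa_por_idade : Prop := ∀ (grupo : List (String × Int)), Dom_agrupa_por_idade grupo → Spec_agrupa_por_idade grupo (agrupa_por_idade grupo)

-- ===== LEMMAS AND PROOFS =====

-- Loop invariant: folding A's step over g starting from the four-key dict with accumulated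
-- buckets a,b,c,d yields those buckets extended by the corresponding filtered names of g.
theorem pv_inv (g : List (String × Int)) (a b c d : List String) :
    (g.foldl (fun d' p =>
        if p.2 ≤ 11 then d'.modify "criança" [] (· ++ [p.1])
        else if p.2 ≤ 17 then d'.modify "adolescente" [] (· ++ [p.1])
        else if p.2 ≤ 59 then d'.modify "adulto" [] (· ++ [p.1])
        else d'.modify "idoso" [] (· ++ [p.1]))
      (PySem.Dict.ofList [("criança", a), ("adolescente", b), ("adulto", c), ("idoso", d)])).items
    = [("criança", a ++ pvNomes g (fun i => i ≤ 11)),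
       ("adolescente", b ++ pvNomes g (fun i => 11 < i && i ≤ 17)),
       ("adulto", c ++ pvNomes g (fun i => 17 < i && i ≤ 59)),
       ("idoso", d ++ pvNomes g (fun i => 59 < i))] := by
  induction g generalizing a b c d with
  | nil =>
    simp [pvNomes, PySem.Dict.ofList, PySem.Dict.items, PySem.Dict.update, PySem.Dict.insert,
          PySem.Dict.empty, PySem.Dict.contains, PySem.Dict.get?]
  | cons p g ih =>
    have hcr : (PySem.Dict.ofList [("criança", a), ("adolescente", b), ("adulto", c), ("idoso", d)]).modify "criança" [] (· ++ [p.1])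
        = PySem.Dict.ofList [("criança", a ++ [p.1]), ("adolescente", b), ("adulto", c), ("idoso", d)] := by
      simp [PySem.Dict.ofList, PySem.Dict.modify, PySem.Dict.update, PySem.Dict.insert,
            PySem.Dict.empty, PySem.Dict.contains, PySem.Dict.getD, PySem.Dict.get?]
    have had : (PySem.Dict.ofList [("criança", a), ("adolescente", b), ("adulto", c), ("idoso", d)]).modify "adolescente" [] (· ++ [p.1])
        = PySem.Dict.ofList [("criança", a), ("adolescente", b ++ [p.1]), ("adulto", c), ("idoso", d)] := by
      simp [PySem.Dict.ofList, PySem.Dict.modify, PySem.Dict.update, PySem.Dict.insert,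
            PySem.Dict.empty, PySem.Dict.contains, PySem.Dict.getD, PySem.Dict.get?]
    have hau : (PySem.Dict.ofList [("criança", a), ("adolescente", b), ("adulto", c), ("idoso", d)]).modify "adulto" [] (· ++ [p.1])
        = PySem.Dict.ofList [("criança", a), ("adolescente", b), ("adulto", c ++ [p.1]), ("idoso", d)] := by
      simp [PySem.Dict.ofList, PySem.Dict.modify, PySem.Dict.update, PySem.Dict.insert,
            PySem.Dict.empty, PySem.Dict.contains, PySem.Dict.getD, PySem.Dict.get?]
    have hid : (PySem.Dict.ofList [("criança", a), ("adolescente", b), ("adulto", c), ("idoso", d)]).modify "idoso" [] (· ++ [p.1])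
        = PySem.Dict.ofList [("criança", a), ("adolescente", b), ("adulto", c), ("idoso", d ++ [p.1])] := by
      simp [PySem.Dict.ofList, PySem.Dict.modify, PySem.Dict.update, PySem.Dict.insert,
            PySem.Dict.empty, PySem.Dict.contains, PySem.Dict.getD, PySem.Dict.get?]
    by_cases h1 : p.2 ≤ 11
    · have e2 : (11 < p.2 && p.2 ≤ 17) = false := by simp; omega
      have e3 : (17 < p.2 && p.2 ≤ 59) = false := by simp; omega
      have e4 : ¬ (59:Int) < p.2 := by omega
      simp only [List.foldl_cons, if_pos h1]
      rw [hcr, ih]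
      simp [pvNomes, List.filter_cons, h1, e2, e3, e4]
    · by_cases h2 : p.2 ≤ 17
      · have e2 : (11 < p.2 && p.2 ≤ 17) = true := by simp; omega
        have e3 : (17 < p.2 && p.2 ≤ 59) = false := by simp; omega
        have e4 : ¬ (59:Int) < p.2 := by omega
        simp only [List.foldl_cons, if_neg h1, if_pos h2]
        rw [had, ih]
        simp [pvNomes, List.filter_cons, h1, e2, e3, e4]
      · by_cases h3 : p.2 ≤ 59
        · have e2 : (11 < p.2 && p.2 ≤ 17) = false := by simp; omega
          have e3 : (17 < p.2 && p.2 ≤ 59) = true := by simp; omega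
          have e4 : ¬ (59:Int) < p.2 := by omega
          simp only [List.foldl_cons, if_neg h1, if_neg h2, if_pos h3]
          rw [hau, ih]
          simp [pvNomes, List.filter_cons, h1, e2, e3, e4]
        · have e2 : (11 < p.2 && p.2 ≤ 17) = false := by simp; omega
          have e3 : (17 < p.2 && p.2 ≤ 59) = false := by simp; omega
          have e4 : (59:Int) < p.2 := by omega
          simp only [List.foldl_cons, if_neg h1, if_neg h2, if_neg h3]
          rw [hid, ih]
          simp [pvNomes, List.filter_cons, h1, e2, e3, e4]

-- ===== VERDICT (by name: the statement is the Claim_ definition above) =====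
theorem agrupa_por_idade_spec : Claim_equal_agrupa_por_idade := by
  intro grupo _
  show agrupa_por_idade grupo = agrupa_por_idade_alt grupo
  unfold agrupa_por_idade agrupa_por_idade_alt
  rw [pv_inv]
  simp [PySem.Dict.ofList, PySem.Dict.items, PySem.Dict.update, PySem.Dict.insert,
        PySem.Dict.empty, PySem.Dict.contains, PySem.Dict.get?]
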